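-- pv_equiv track=rewrite | github.com/BruinGrowly/LJPW-Language-Translator | experiments/wedau_deep_semantic_translation.py | _has_reduplication
-- ===== SOURCE A (Python) =====
-- def _has_reduplication(word: str) -> bool:
--     """Detect reduplication."""
--     if len(word) < 4:
--         return False
--
--     # Check various reduplication patterns
--     for split_point in range(2, len(word)//2 + 1):
--         chunk1 = word[:split_point]
--         chunk2 = word[split_point:split_point*2]
--         if chunk1 == chunk2:
--             return True
--
--     return False
-- ===== SOURCE B (Python) =====
-- def _has_reduplication(word: str) -> bool:
--     """Detect reduplication via the Z-function: O(n) instead of O(n^2)."""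
--     n = len(word)
--     z = [0] * n
--     l = 0
--     r = 0
--     for i in range(1, n):
--         zi = min(r - i, z[i - l]) if i < r else 0
--         while i + zi < n and word[zi] == word[i + zi]:
--             zi += 1
--         z[i] = zi
--         if i + zi > r:
--             l = i
--             r = i + zi
--     return any(z[k] >= k for k in range(2, n // 2 + 1))
-- ===== Notes on version B (the rewrite author's own statement) =====
-- stated objective: faster
-- what changed: Replaced the per-split-point slice-and-compare loop by a single linear-time Z-function (longest-common-prefix array) pass; reduplication at k holds iff z[k] >= k.
import Mathlib
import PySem

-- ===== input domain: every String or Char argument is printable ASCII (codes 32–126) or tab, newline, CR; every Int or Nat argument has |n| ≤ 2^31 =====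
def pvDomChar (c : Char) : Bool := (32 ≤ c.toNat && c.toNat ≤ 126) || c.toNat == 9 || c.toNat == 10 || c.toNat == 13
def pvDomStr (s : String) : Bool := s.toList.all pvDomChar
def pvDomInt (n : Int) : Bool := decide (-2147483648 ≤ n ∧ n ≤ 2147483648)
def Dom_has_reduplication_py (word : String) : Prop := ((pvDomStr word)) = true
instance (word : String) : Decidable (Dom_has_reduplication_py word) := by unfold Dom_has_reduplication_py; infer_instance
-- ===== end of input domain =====

-- B replaces A's quadratic loop of slice comparisons by the linear-time Z-function
-- (longest-common-prefix array): reduplication at k iff z[k] >= k.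

-- ===== PORT A =====
-- literal port of A: for split_point in range(2, len(word)//2 + 1), compare the two slices
def has_reduplication_py (word : String) : Bool :=
  let w := word.toList
  if w.length < 4 then false
  else
    (PySem.List.pyRange 2 ((w.length : Int) / 2 + 1) 1).any (fun sp =>
      PySem.List.slice w none (some sp) == PySem.List.slice w (some sp) (some (sp * 2)))

-- ===== PORT B =====
-- the inner while loop of Source B: extend zi while word[zi] == word[i+zi]
def zExtend (w : List Char) (i : Nat) (zi : Nat) : Nat :=
  if h : i + zi < w.length ∧ w.getD zi ' ' = w.getD (i + zi) ' ' then
    zExtend w i (zi + 1)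
  else zi
termination_by w.length - (i + zi)

-- the main for loop of Source B over i = 1 .. n-1, carrying (z, l, r); z is built left to right
def zLoop (w : List Char) (i : Nat) (acc : List Nat) (l r : Nat) : List Nat :=
  if _h : i < w.length then
    let zi0 := if i < r then min (r - i) (acc.getD (i - l) 0) else 0
    let zi := zExtend w i zi0
    let acc' := acc ++ [zi]
    if i + zi > r then zLoop w (i + 1) acc' i (i + zi)
    else zLoop w (i + 1) acc' l r
  else acc
termination_by w.length - i

def has_reduplication_py_alt (word : String) : Bool :=
  let w := word.toList
  let n := w.length
  let z := if n = 0 then [] else zLoop w 1 [0] 0 0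
  (PySem.List.pyRange 2 ((n : Int) / 2 + 1) 1).any (fun k =>
    decide ((k : Int) ≤ (z.getD k.toNat 0 : Int)))

-- ===== PRECONDITION & SPEC =====
def Spec_has_reduplication_py (word : String) (out : Bool) : Prop := out = has_reduplication_py_alt word
instance (word : String) (out : Bool) : Decidable (Spec_has_reduplication_py word out) := by unfold Spec_has_reduplication_py; infer_instance

-- ===== CLAIM (what is proved, stated in full; the proofs are below) =====
def Claim_equal_has_reduplication_py : Prop := ∀ (word : String), Dom_has_reduplication_py word → Spec_has_reduplication_py word (has_reduplication_py word)

-- ===== LEMMAS AND PROOFS =====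

-- longest common prefix length of two lists
def lcp : List Char → List Char → Nat
  | a :: as, b :: bs => if a = b then lcp as bs + 1 else 0
  | _, _ => 0

theorem lcp_le_left : ∀ (a b : List Char), lcp a b ≤ a.length
  | a :: as, b :: bs => by
    simp only [lcp]; split
    · simpa using lcp_le_left as bs
    · simp
  | [], _ => by simp [lcp]
  | _ :: _, [] => by simp [lcp]

theorem lcp_le_right : ∀ (a b : List Char), lcp a b ≤ b.length
  | a :: as, b :: bs => by
    simp only [lcp]; split
    · simpa using lcp_le_right as bs
    · simp
  | [], _ => by simp [lcp]
  | _ :: _, [] => by simp [lcp]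

theorem lcp_nil_right (a : List Char) : lcp a [] = 0 := by
  cases a <;> simp [lcp]

-- pointwise agreement below the lcp
theorem getD_eq_of_lt_lcp (d : Char) : ∀ (a b : List Char) (t : Nat), t < lcp a b → a.getD t d = b.getD t d
  | a :: as, b :: bs, t, ht => by
    simp only [lcp] at ht
    split at ht
    · cases t with
      | zero => simpa
      | succ t => simpa using getD_eq_of_lt_lcp d as bs t (by omega)
    · omega
  | [], _, t, ht => by simp [lcp] at ht
  | _ :: _, [], t, ht => by simp [lcp] at ht

-- splitting the lcp at a matched prefix of length k
theorem lcp_shift (d : Char) : ∀ (k : Nat) (a b : List Char), k ≤ a.length → k ≤ b.length →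
    (∀ t, t < k → a.getD t d = b.getD t d) → lcp a b = k + lcp (a.drop k) (b.drop k)
  | 0, a, b, _, _, _ => by simp
  | k + 1, a :: as, b :: bs, ha, hb, hm => by
    have hhd : a = b := by simpa using hm 0 (by omega)
    have := lcp_shift d k as bs (by simpa using ha) (by simpa using hb)
      (fun t ht => by simpa using hm (t + 1) (by omega))
    simp only [lcp, if_pos hhd, List.drop_succ_cons]
    omega
  | k + 1, [], b, ha, _, _ => by simp at ha
  | k + 1, _ :: _, [], _, hb, _ => by simp at hb

-- take-k equality characterises lcp ≥ k
theorem take_eq_iff_le_lcp : ∀ (k : Nat) (a b : List Char), k ≤ a.length → k ≤ b.length →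
    (a.take k = b.take k ↔ k ≤ lcp a b)
  | 0, a, b, _, _ => by simp
  | k + 1, a :: as, b :: bs, ha, hb => by
    have := take_eq_iff_le_lcp k as bs (by simpa using ha) (by simpa using hb)
    simp only [List.take_succ_cons, List.cons_eq_cons, lcp]
    constructor
    · rintro ⟨rfl, h2⟩
      rw [if_pos rfl]
      have := this.mp h2
      omega
    · intro h
      split at h
      · exact ⟨by assumption, this.mpr (by omega)⟩
      · omega
  | k + 1, [], b, ha, _ => by simp at ha
  | k + 1, _ :: _, [], _, hb => by simp at hb

theorem getD_drop (w : List Char) (i t : Nat) (d : Char) : (w.drop i).getD t d = w.getD (i + t) d := by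
  simp [List.getD, List.getElem?_drop]

theorem zExtend_eq (w : List Char) (i zi : Nat) :
    zExtend w i zi = zi + lcp (w.drop zi) (w.drop (i + zi)) := by
  fun_induction zExtend w i zi with
  | case1 zi h ih =>
    obtain ⟨hlt, heq⟩ := h
    have hzi : zi < w.length := by omega
    rw [show i + (zi + 1) = i + zi + 1 by omega] at ih
    rw [ih, List.drop_eq_getElem_cons hzi, List.drop_eq_getElem_cons hlt]
    simp only [lcp]
    rw [if_pos (by rwa [List.getD_eq_getElem w ' ' hzi, List.getD_eq_getElem w ' ' hlt] at heq)]
    omega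
  | case2 zi h =>
    by_cases hlt : i + zi < w.length
    · have heq : ¬ w.getD zi ' ' = w.getD (i + zi) ' ' := fun hc => h ⟨hlt, hc⟩
      have hzi : zi < w.length := by omega
      rw [List.drop_eq_getElem_cons hzi, List.drop_eq_getElem_cons hlt]
      simp only [lcp]
      rw [if_neg (by rwa [List.getD_eq_getElem w ' ' hzi, List.getD_eq_getElem w ' ' hlt] at heq)]
      simp
    · rw [show w.drop (i + zi) = [] from List.drop_of_length_le (by omega), lcp_nil_right]
      simp

-- if a prefix of length zi is already matched at shift i, extension computes the full lcp
theorem zExtend_eq_lcp (w : List Char) (i zi : Nat) (hzi : zi ≤ w.length - i) (hi : i ≤ w.length)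
    (hm : ∀ t, t < zi → w.getD t ' ' = w.getD (i + t) ' ') :
    zExtend w i zi = lcp w (w.drop i) := by
  have hb : zi ≤ (w.drop i).length := by rw [List.length_drop]; omega
  have hshift := lcp_shift ' ' zi w (w.drop i) (by omega) hb
    (fun t ht => by rw [getD_drop]; exact hm t ht)
  rw [zExtend_eq, hshift, List.drop_drop]

-- what z[j] holds in Source B: 0 at j = 0, the true lcp elsewhere
def Zp (w : List Char) (j : Nat) : Nat := if j = 0 then 0 else lcp w (w.drop j)

theorem zLoop_spec (w : List Char) : ∀ (fuel i : Nat) (acc : List Nat) (l r : Nat),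
    fuel = w.length - i → 1 ≤ i → i ≤ w.length → acc.length = i →
    (∀ j, j < i → acc.getD j 0 = Zp w j) → l < i → r ≤ l + Zp w l →
    ∀ j, j < w.length → (zLoop w i acc l r).getD j 0 = Zp w j := by
  intro fuel
  induction fuel with
  | zero =>
    intro i acc l r hfuel h1 hn hlen hacc hl hr j hj
    rw [zLoop, dif_neg (by omega)]
    exact hacc j (by omega)
  | succ f ih =>
    intro i acc l r hfuel h1 hn hlen hacc hl hr j hj
    by_cases hi : i < w.length
    · have hZpl : Zp w l ≤ w.length - l := by
        by_cases hl0 : l = 0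
        · simp [Zp, hl0]
        · simpa [Zp, hl0] using lcp_le_right w (w.drop l)
      have hbound : (if i < r then min (r - i) (acc.getD (i - l) 0) else 0) ≤ w.length - i := by
        by_cases hir : i < r
        · simp only [if_pos hir]; omega
        · simp only [if_neg hir]; omega
      have hmatch : ∀ t, t < (if i < r then min (r - i) (acc.getD (i - l) 0) else 0) →
          w.getD t ' ' = w.getD (i + t) ' ' := by
        intro t ht
        by_cases hir : i < r
        · simp only [if_pos hir] at ht
          have hl1 : 1 ≤ l := by
            by_contra hc
            have : l = 0 := by omega
            simp [Zp, this] at hr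
            omega
          have hZil : acc.getD (i - l) 0 = Zp w (i - l) := hacc (i - l) (by omega)
          have ht1 : t < lcp w (w.drop (i - l)) := by
            have : Zp w (i - l) = lcp w (w.drop (i - l)) := by simp [Zp]; omega
            omega
          have e1 : w.getD t ' ' = w.getD ((i - l) + t) ' ' := by
            rw [getD_eq_of_lt_lcp ' ' w (w.drop (i - l)) t ht1, getD_drop]
          have ht2 : (i - l) + t < lcp w (w.drop l) := by
            have : Zp w l = lcp w (w.drop l) := by simp [Zp]; omega
            omega
          have e2 : w.getD ((i - l) + t) ' ' = w.getD (l + ((i - l) + t)) ' ' := by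
            rw [getD_eq_of_lt_lcp ' ' w (w.drop l) _ ht2, getD_drop]
          rw [e1, e2, show l + ((i - l) + t) = i + t by omega]
        · simp [if_neg hir] at ht
      have hz : zExtend w i (if i < r then min (r - i) (acc.getD (i - l) 0) else 0) = Zp w i := by
        rw [zExtend_eq_lcp w i _ hbound (by omega) hmatch, Zp, if_neg (by omega)]
      have hacc' : ∀ j', j' < i + 1 →
          (acc ++ [zExtend w i (if i < r then min (r - i) (acc.getD (i - l) 0) else 0)]).getD j' 0 = Zp w j' := by
        intro j' hj'
        by_cases hji : j' < i
        · rw [List.getD, List.getElem?_append_left (by omega)]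
          exact hacc j' hji
        · have : j' = i := by omega
          subst this
          rw [List.getD, List.getElem?_append_right (by omega), hlen]
          simpa using hz
      rw [hz] at hacc'
      rw [zLoop, dif_pos hi]
      show (if i + zExtend w i (if i < r then min (r - i) (acc.getD (i - l) 0) else 0) > r then
          zLoop w (i + 1) (acc ++ [zExtend w i (if i < r then min (r - i) (acc.getD (i - l) 0) else 0)]) i
            (i + zExtend w i (if i < r then min (r - i) (acc.getD (i - l) 0) else 0))
        else
          zLoop w (i + 1) (acc ++ [zExtend w i (if i < r then min (r - i) (acc.getD (i - l) 0) else 0)]) l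
            r).getD j 0 = Zp w j
      rw [hz]
      split_ifs with hgt
      · exact ih (i + 1) _ i (i + Zp w i) (by omega) (by omega) (by omega)
          (by simp [hlen]) hacc' (by omega) (Nat.le_refl _) j hj
      · exact ih (i + 1) _ l r (by omega) (by omega) (by omega)
          (by simp [hlen]) hacc' (by omega) hr j hj
    · rw [zLoop, dif_neg hi]
      exact hacc j (by omega)

theorem any_congr' {α : Type} (l : List α) (p q : α → Bool) (h : ∀ x ∈ l, p x = q x) :
    l.any p = l.any q := by
  induction l with
  | nil => rfl
  | cons a t ih => simp only [List.any_cons, h a (by simp), ih (fun x hx => h x (by simp [hx]))]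

-- ===== VERDICT (by name: the statement is the Claim_ definition above) =====
theorem has_reduplication_py_spec : Claim_equal_has_reduplication_py := by
  intro word _
  show has_reduplication_py word = has_reduplication_py_alt word
  simp only [has_reduplication_py, has_reduplication_py_alt]
  generalize word.toList = w
  by_cases hn4 : w.length < 4
  · rw [if_pos hn4, PySem.List.pyRange_one_eq_nil (by omega)]
    simp
  · rw [if_neg hn4]
    have hz : ∀ j, j < w.length →
        (if w.length = 0 then ([] : List Nat) else zLoop w 1 [0] 0 0).getD j 0 = Zp w j := by
      intro j hj
      rw [if_neg (by omega)]
      refine zLoop_spec w (w.length - 1) 1 [0] 0 0 rfl (Nat.le_refl 1) (by omega) (by simp)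
        ?_ (by omega) ?_ j hj
      · intro j' hj'
        have hj0 : j' = 0 := by omega
        subst hj0
        simp [Zp]
      · simp [Zp]
    refine any_congr' _ _ _ ?_
    intro k hk
    rw [PySem.List.mem_pyRange_one] at hk
    obtain ⟨m, rfl⟩ : ∃ m : Nat, k = (m : Int) := ⟨k.toNat, by omega⟩
    have hm2 : 2 ≤ m := by omega
    have hmn : m ≤ w.length / 2 := by omega
    have hB : PySem.List.slice w (some (m : Int)) (some ((m : Int) * 2)) = (w.drop m).take m := by
      rw [show ((m : Int) * 2) = ((m * 2 : Nat) : Int) by push_cast; ring, PySem.List.slice_natCast]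
      congr 1
      omega
    rw [PySem.List.slice_to_natCast, hB]
    rw [show ((m : Int)).toNat = m from Int.toNat_natCast m, hz m (by omega)]
    have hiff := take_eq_iff_le_lcp m w (w.drop m) (by omega) (by rw [List.length_drop]; omega)
    rw [Bool.eq_iff_iff, beq_iff_eq, decide_eq_true_iff, hiff]
    simp only [Zp, if_neg (by omega : ¬ m = 0)]
    omega
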